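-- pv_equiv track=rewrite | github.com/autoscrape-labs/pydoll | pydoll/elements/utils/selector_parser.py | _consume_css_combinator
-- ===== SOURCE A (Python) =====
-- def _consume_css_combinator(expression: str, start: int) -> tuple[str, int]:
--     """Consume a CSS combinator region and return ``(combinator, next_index)``."""
--     char_index = start
--     while char_index < len(expression) and expression[char_index] == ' ':
--         char_index += 1
--     if char_index < len(expression) and expression[char_index] in '>+~':
--         combinator = expression[char_index]
--         char_index += 1
--         while char_index < len(expression) and expression[char_index] == ' ':
--             char_index += 1
--     else:
--         combinator = ' '
--     return combinator, char_index
-- ===== SOURCE B (Python) =====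
-- def _consume_css_combinator(expression: str, start: int) -> tuple[str, int]:
--     """Consume a CSS combinator region and return ``(combinator, next_index)``."""
--     tail = expression[start:]
--     stripped = tail.lstrip(' ')
--     if stripped[:1] in ('>', '+', '~'):
--         rest = stripped[1:].lstrip(' ')
--         return stripped[0], start + len(tail) - len(rest)
--     return ' ', start + len(tail) - len(stripped)
-- ===== Notes on version B (the rewrite author's own statement) =====
-- stated objective: idiomatic
-- what changed: Replaces A's index-walking whitespace loops with slicing the suffix at start, lstrip(' ') to strip spaces, and length arithmetic to recover the next index; no explicit loop remains.
-- outside the precondition, e.g. on _consume_css_combinator('  x ', -1): A returns (' ', 2), B returns (' ', 0); on _consume_css_combinator('a', -5): A raises IndexError, B returns (' ', -5)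
import Mathlib
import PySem

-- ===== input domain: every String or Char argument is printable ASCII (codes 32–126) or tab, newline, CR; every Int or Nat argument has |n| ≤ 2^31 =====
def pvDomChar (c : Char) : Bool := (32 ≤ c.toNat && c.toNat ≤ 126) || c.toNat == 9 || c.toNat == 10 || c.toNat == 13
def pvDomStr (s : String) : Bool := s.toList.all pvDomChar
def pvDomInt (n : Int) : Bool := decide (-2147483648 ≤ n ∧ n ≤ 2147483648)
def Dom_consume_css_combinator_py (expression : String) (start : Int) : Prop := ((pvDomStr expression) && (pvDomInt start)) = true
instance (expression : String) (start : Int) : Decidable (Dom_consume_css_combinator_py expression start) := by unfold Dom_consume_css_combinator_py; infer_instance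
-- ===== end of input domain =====

-- B replaces A's index-walking loops by slicing off the suffix at `start`, stripping spaces
-- with lstrip, and recovering the index by length arithmetic (objective: idiomatic; same cost).

-- ===== PORT A =====
-- 'while char_index < len(expression) and expression[char_index] == " ": char_index += 1'
-- (fuel only makes the loop total; it never changes the value. pyGet? = none is Python's
-- IndexError; the value returned there is dead code, Pre_ excludes those inputs)
def pvSkipSpacesAGo (e : List Char) : Int → Nat → Int
  | i, 0 => i
  | i, k + 1 =>
    if i < (e.length : Int) ∧ PySem.List.pyGet? e i = some ' ' then pvSkipSpacesAGo e (i + 1) k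
    else i

def pvSkipSpacesA (e : List Char) (i : Int) : Int :=
  pvSkipSpacesAGo e i ((e.length : Int) - i).toNat

def consume_css_combinator_py (expression : String) (start : Int) : String × Int :=
  let e := expression.toList
  let i1 := pvSkipSpacesA e start
  if i1 < (e.length : Int) then
    match PySem.List.pyGet? e i1 with
    | some c =>
      if c = '>' ∨ c = '+' ∨ c = '~' then
        (String.ofList [c], pvSkipSpacesA e (i1 + 1))
      else (" ", i1)
    | none => (" ", i1)   -- IndexError in Python; excluded by Pre_
  else (" ", i1)

-- ===== PORT B =====
-- expression[start:] → PySem.List.slice; lstrip(' ') is ported by hand as dropWhile (· = ' ')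
-- over List Char, which is exact (it removes exactly the leading space characters);
-- stripped[:1] in ('>','+','~') → a match on the head of stripped.
def consume_css_combinator_py_alt (expression : String) (start : Int) : String × Int :=
  let tail := PySem.List.slice expression.toList (some start) none
  let stripped := tail.dropWhile (fun c => c == ' ')
  match stripped with
  | c :: rest0 =>
    if c = '>' ∨ c = '+' ∨ c = '~' then
      let rest := rest0.dropWhile (fun c => c == ' ')
      (String.ofList [c], start + (tail.length : Int) - (rest.length : Int))
    else (" ", start + (tail.length : Int) - (stripped.length : Int))
  | [] => (" ", start + (tail.length : Int) - (stripped.length : Int))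

-- ===== PRECONDITION & SPEC =====
-- Pre_ restricts to the function's natural domain of non-negative start indices: for negative
-- start A either raises IndexError (start < -len) or scans via Python's negative-index
-- wraparound, an accident of indexing this internal parser helper is never called with.
def Pre_consume_css_combinator_py (expression : String) (start : Int) : Prop :=
  0 ≤ start
instance (expression : String) (start : Int) : Decidable (Pre_consume_css_combinator_py expression start) := by unfold Pre_consume_css_combinator_py; infer_instance

def pvWitness_consume_css_combinator_py : String × Int := (" > a", 0)

def Spec_consume_css_combinator_py (expression : String) (start : Int) (out : String × Int) : Prop := out = consume_css_combinator_py_alt expression start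
instance (expression : String) (start : Int) (out : String × Int) : Decidable (Spec_consume_css_combinator_py expression start out) := by unfold Spec_consume_css_combinator_py; infer_instance

-- ===== CLAIM (what is proved, stated in full; the proofs are below) =====
def Claim_equal_consume_css_combinator_py : Prop := ∀ (expression : String) (start : Int), Dom_consume_css_combinator_py expression start → Pre_consume_css_combinator_py expression start → Spec_consume_css_combinator_py expression start (consume_css_combinator_py expression start)

-- ===== LEMMAS AND PROOFS =====

-- fuel-free unfolding of A's whitespace loop
theorem pvSkipSpacesA_eq (e : List Char) (i : Int) :
    pvSkipSpacesA e i
      = if i < (e.length : Int) ∧ PySem.List.pyGet? e i = some ' ' then pvSkipSpacesA e (i + 1)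
        else i := by
  unfold pvSkipSpacesA
  cases hk : ((e.length : Int) - i).toNat with
  | zero =>
    have hni : ¬ i < (e.length : Int) := by omega
    simp [pvSkipSpacesAGo, hni]
  | succ k =>
    by_cases hc : i < (e.length : Int) ∧ PySem.List.pyGet? e i = some ' '
    · have hk1 : ((e.length : Int) - (i + 1)).toNat = k := by omega
      simp [pvSkipSpacesAGo, hc, hk1]
    · simp [pvSkipSpacesAGo, hc]

-- the suffix of e that starts where the dropWhile result sits
theorem pv_drop_of_suffix (e s : List Char) (h : s <:+ e) :
    e.drop (e.length - s.length) = s := by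
  obtain ⟨t, rfl⟩ := h
  simp

-- pyGet? of e at the index where a (nonempty) suffix starts is that suffix's head
theorem pv_pyGet_suffix (e s : List Char) (h : s <:+ e) (c : Char) (rest : List Char)
    (hs : s = c :: rest) :
    PySem.List.pyGet? e ((e.length : Int) - (s.length : Int)) = some c := by
  obtain ⟨t, rfl⟩ := h
  subst hs
  have : ((t ++ c :: rest).length : Int) - ((c :: rest).length : Int) = (t.length : Int) := by
    simp
  rw [this, PySem.List.pyGet?_natCast]
  simp

-- A's space skip, expressed through dropWhile on the suffix at i
theorem pvSkipSpacesA_dropWhile (e : List Char) (i : Int) (h0 : 0 ≤ i)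
    (hle : i ≤ (e.length : Int)) :
    pvSkipSpacesA e i
      = (e.length : Int) - (((e.drop i.toNat).dropWhile (fun c => c == ' ')).length : Int) := by
  by_cases h : i < (e.length : Int)
  · have hidx : i.toNat < e.length := by omega
    have hdrop : e.drop i.toNat = e[i.toNat] :: e.drop (i.toNat + 1) :=
      List.drop_eq_getElem_cons hidx
    have hget : PySem.List.pyGet? e i = some e[i.toNat] :=
      PySem.List.pyGet?_eq_some_getElem e h0 h
    by_cases hc : e[i.toNat] = ' '
    · have hrec := pvSkipSpacesA_dropWhile e (i + 1) (by omega) (by omega)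
      rw [pvSkipSpacesA_eq, if_pos ⟨h, by rw [hget, hc]⟩, hrec]
      have : (i + 1).toNat = i.toNat + 1 := by omega
      rw [hdrop, this, List.dropWhile_cons]
      simp [hc]
    · rw [pvSkipSpacesA_eq, if_neg (by rw [hget]; simp [hc])]
      rw [hdrop, List.dropWhile_cons]
      have hb : (e[i.toNat] == ' ') = false := by simp [hc]
      rw [hb]
      simp only [Bool.false_eq_true, if_false, List.length_cons, List.length_drop]
      omega
  · have : i = (e.length : Int) := by omega
    subst this
    rw [pvSkipSpacesA_eq, if_neg (by simp)]
    simp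
termination_by ((e.length : Int) - i).toNat
decreasing_by omega

-- the dropWhile result is a suffix of e
theorem pv_stripped_suffix (e : List Char) (n : Nat) :
    (e.drop n).dropWhile (fun c => c == ' ') <:+ e :=
  List.IsSuffix.trans (List.dropWhile_suffix _) (List.drop_suffix n e)

-- ===== VERDICT (by name: the statement is the Claim_ definition above) =====
theorem consume_css_combinator_py_spec : Claim_equal_consume_css_combinator_py := by
  intro expression start _ hpre
  unfold Spec_consume_css_combinator_py consume_css_combinator_py consume_css_combinator_py_alt
  dsimp only
  have hpre' : (0:Int) ≤ start := hpre
  set e := expression.toList with he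
  rw [PySem.List.slice_from e hpre']
  by_cases hbig : (e.length : Int) ≤ start
  · -- start past the end: tail is empty, A's loops do nothing
    have hdrop : e.drop start.toNat = [] := List.drop_eq_nil_of_le (by omega)
    have hskip : pvSkipSpacesA e start = start := by
      rw [pvSkipSpacesA_eq, if_neg (by omega)]
    rw [hdrop, hskip]
    simp
    omega
  · have hlt : start < (e.length : Int) := by omega
    have hskip := pvSkipSpacesA_dropWhile e start hpre' (by omega)
    cases hs : (e.drop start.toNat).dropWhile (fun c => c == ' ') with
    | nil =>
      rw [hs] at hskip
      rw [hskip]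
      simp
      omega
    | cons c rest0 =>
      have hsuf : c :: rest0 <:+ e := hs ▸ pv_stripped_suffix e start.toNat
      have hget : PySem.List.pyGet? e ((e.length : Int) - ((c :: rest0).length : Int)) = some c :=
        pv_pyGet_suffix e (c :: rest0) hsuf c rest0 rfl
      rw [hs] at hskip
      have hlen : (c :: rest0).length ≤ e.length := hsuf.length_le
      have hi1 : pvSkipSpacesA e start < (e.length : Int) := by
        rw [hskip]; simp only [List.length_cons]; push_cast; omega
      rw [if_pos hi1, hskip, hget]
      dsimp only
      by_cases hc : c = '>' ∨ c = '+' ∨ c = '~'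
      · rw [if_pos hc, if_pos hc]
        have hrsuf : rest0 <:+ e :=
          List.IsSuffix.trans (List.suffix_cons c rest0) hsuf
        have h2 : pvSkipSpacesA e ((e.length : Int) - ((c :: rest0).length : Int) + 1)
            = (e.length : Int) - ((rest0.dropWhile (fun c => c == ' ')).length : Int) := by
          have heq : (e.length : Int) - ((c :: rest0).length : Int) + 1
              = (e.length : Int) - (rest0.length : Int) := by simp; omega
          rw [heq, pvSkipSpacesA_dropWhile e _ (by omega) (by omega)]
          have : ((e.length : Int) - (rest0.length : Int)).toNat = e.length - rest0.length := by
            omega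
          rw [this, pv_drop_of_suffix e rest0 hrsuf]
        rw [h2]
        simp
        omega
      · rw [if_neg hc, if_neg hc]
        simp
        omega
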